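-- pv_equiv track=rewrite | github.com/hanssy130/Python-BCIT-COMP1510 | Labs/Lab06/sparsevector.py | sparse_add
-- ===== SOURCE A (Python) =====
-- def sparse_add(vector1, vector2):
--     '''
--     A function that creates new dictionary representing the sum of two vectors.
--
--     :param vector1: dictionary of integers
--     :param vector2: dictionary of integers
--     :precondition: numbers must be greater than 0
--     :postcondition: calcualtes the correct sum into a new dictionary
--     :return: dictionary representing the sum of two vectors
--     >>> sparse_add({0:4, 1:5, 2:7}, {0:3, 1:4, 3:9})
--     {0: 7, 1: 9, 2: 7, 3: 9}
--     >>> sparse_add({0:5, 1:5, 2:5}, {0:1, 1:2, 2:3})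
--     {0: 6, 1: 7, 2: 8}
--     '''
--     sum = {}
--     for i in vector1.keys():
--         sum[i] = vector1[i]
--     for i in vector2.keys():
--         sum[i] = vector2[i]
--     for i in vector1.keys():
--         for j in vector2.keys():
--             if i == j:
--                 sum[i] = vector1[i] + vector2[j]
--                 if sum[i] == 0:
--                     sum.pop(i)
--     else:
--         return sum
-- ===== SOURCE B (Python) =====
-- def sparse_add(vector1, vector2):
--     """Single linear pass over each dict's keys, building a fresh result; no
--     copy-then-nested-rescan. Drops a common key only when its sum is 0."""
--     result = {}
--     for key in vector1:
--         if key in vector2: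
--             total = vector1[key] + vector2[key]
--             if total != 0:
--                 result[key] = total
--         else:
--             result[key] = vector1[key]
--     for key in vector2:
--         if key not in vector1:
--             result[key] = vector2[key]
--     return result
-- ===== Notes on version B (the rewrite author's own statement) =====
-- stated objective: faster
-- what changed: Replaces A's copy-both-dicts-then-quadratic nested key scan (with in-place overwrite and pop of zero sums) by a single linear pass over each dict that builds a fresh result directly, keeping unique keys and storing a common key only when its sum is nonzero.
import Mathlib
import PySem

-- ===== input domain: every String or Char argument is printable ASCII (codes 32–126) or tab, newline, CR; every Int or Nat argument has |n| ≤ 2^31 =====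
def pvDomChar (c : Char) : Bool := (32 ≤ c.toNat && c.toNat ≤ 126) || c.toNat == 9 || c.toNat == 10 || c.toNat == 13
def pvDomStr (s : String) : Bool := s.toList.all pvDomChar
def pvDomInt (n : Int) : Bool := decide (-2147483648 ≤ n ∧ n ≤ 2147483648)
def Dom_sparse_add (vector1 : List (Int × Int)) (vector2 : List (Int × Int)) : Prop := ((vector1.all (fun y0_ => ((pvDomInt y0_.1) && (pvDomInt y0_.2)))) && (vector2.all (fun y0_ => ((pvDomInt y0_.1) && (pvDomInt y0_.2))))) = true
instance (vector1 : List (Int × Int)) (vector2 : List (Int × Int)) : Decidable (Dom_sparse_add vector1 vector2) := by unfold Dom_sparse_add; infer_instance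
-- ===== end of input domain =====

-- B replaces A's copy-both-dicts-then-quadratic nested key scan by one linear pass per dict
-- building a fresh result (objective: faster; return value only, neither version mutates its arguments).


-- ===== PORT A =====
-- Literal port of A: the dict arguments enter as PySem.Dict (Python dict construction);
-- 'vector1[i]' with i drawn from vector1.keys() is exact as 'getD i 0' (the key is present).
def sparse_add (vector1 : List (Int × Int)) (vector2 : List (Int × Int)) : List (Int × Int) :=
  let d1 := PySem.Dict.ofList vector1
  let d2 := PySem.Dict.ofList vector2
  -- sum = {}; for i in vector1.keys(): sum[i] = vector1[i]
  let s := d1.keys.foldl (fun s i => s.insert i (d1.getD i 0)) PySem.Dict.empty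
  -- for i in vector2.keys(): sum[i] = vector2[i]
  let s := d2.keys.foldl (fun s i => s.insert i (d2.getD i 0)) s
  -- for i in vector1.keys(): for j in vector2.keys(): if i == j: sum[i] = v1[i]+v2[j]; if sum[i]==0: sum.pop(i)
  let s := d1.keys.foldl (fun s i =>
    d2.keys.foldl (fun s j =>
      if i == j then
        let s' := s.insert i (d1.getD i 0 + d2.getD j 0)
        if s'.getD i 0 == 0 then s'.erase i else s'
      else s) s) s
  s.items

-- ===== PORT B =====
-- Literal port of Source B: one pass over vector1's keys, one pass over vector2's keys.
def sparse_add_alt (vector1 : List (Int × Int)) (vector2 : List (Int × Int)) : List (Int × Int) :=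
  let d1 := PySem.Dict.ofList vector1
  let d2 := PySem.Dict.ofList vector2
  let r := d1.keys.foldl (fun r k =>
      if d2.contains k then
        let total := d1.getD k 0 + d2.getD k 0
        if total ≠ 0 then r.insert k total else r
      else r.insert k (d1.getD k 0)) PySem.Dict.empty
  let r := d2.keys.foldl (fun r k => if d1.contains k then r else r.insert k (d2.getD k 0)) r
  r.items

-- ===== PRECONDITION & SPEC =====
def Spec_sparse_add (vector1 : List (Int × Int)) (vector2 : List (Int × Int)) (out : List (Int × Int)) : Prop := out = sparse_add_alt vector1 vector2
instance (vector1 : List (Int × Int)) (vector2 : List (Int × Int)) (out : List (Int × Int)) : Decidable (Spec_sparse_add vector1 vector2 out) := by unfold Spec_sparse_add; infer_instance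

-- ===== CLAIM (what is proved, stated in full; the proofs are below) =====
def Claim_equal_sparse_add : Prop := ∀ (vector1 : List (Int × Int)) (vector2 : List (Int × Int)), Dom_sparse_add vector1 vector2 → Spec_sparse_add vector1 vector2 (sparse_add vector1 vector2)

-- ===== LEMMAS AND PROOFS =====

theorem foldl_skip {β : Type} (f : β → Int → β) (i : Int) (hf : ∀ s j, j ≠ i → f s j = s) :
    ∀ (l : List Int), i ∉ l → ∀ s, l.foldl f s = s := by
  intro l hl
  induction l with
  | nil => intro s; rfl
  | cons j t ih =>
    intro s
    simp only [List.mem_cons, not_or] at hl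
    rw [List.foldl_cons, hf s j (Ne.symm hl.1), ih hl.2]

theorem foldl_once {β : Type} (f : β → Int → β) (i : Int) (hf : ∀ s j, j ≠ i → f s j = s) :
    ∀ (l : List Int), l.Nodup → ∀ s, l.foldl f s = if i ∈ l then f s i else s := by
  intro l
  induction l with
  | nil => intro _ s; simp
  | cons j t ih =>
    intro hnd s
    rw [List.nodup_cons] at hnd
    by_cases hj : j = i
    · subst hj
      rw [List.foldl_cons, foldl_skip f j hf t hnd.1]
      simp
    · rw [List.foldl_cons, hf s j hj, ih hnd.2 s]
      simp [Ne.symm hj]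

theorem insert_erase_self (s : PySem.Dict Int Int) (i v : Int) :
    (s.insert i v).erase i = s.erase i := by
  apply PySem.Dict.ext
  by_cases h : s.contains i
  · rw [show ((s.insert i v).erase i).items = ((s.insert i v).items).filter (fun p => !p.1 == i) from rfl,
        PySem.Dict.items_insert_of_contains s v h]
    rw [List.filter_map]
    rw [show (s.erase i).items = s.items.filter (fun p => !p.1 == i) from rfl]
    rw [List.filter_congr (q := fun p => !p.1 == i) ?_]
    · rw [List.map_congr_left ?_, List.map_id]
      intro p hp
      simp only [List.mem_filter] at hp
      have : (p.1 == i) = false := by simpa using hp.2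
      simp [this]
    · intro p _
      by_cases hpi : p.1 = i <;> simp [hpi]
  · rw [show ((s.insert i v).erase i).items = ((s.insert i v).items).filter (fun p => !p.1 == i) from rfl,
        PySem.Dict.items_insert_of_not_contains s v (by simpa using h)]
    simp [List.filter_append, PySem.Dict.erase]

theorem items_foldl_insert_fn (g : Int → Int) :
    ∀ (l : List Int) (d : PySem.Dict Int Int), l.Nodup → d.keys.Nodup →
    (l.foldl (fun s i => s.insert i (g i)) d).items
      = d.items.map (fun p => if p.1 ∈ l then (p.1, g p.1) else p)
        ++ (l.filter (fun i => !d.contains i)).map (fun i => (i, g i)) := by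
  intro l
  induction l with
  | nil => intro d _ _; simp
  | cons i t ih =>
    intro d hnd hd
    rw [List.nodup_cons] at hnd
    rw [List.foldl_cons]
    rw [ih (d.insert i (g i)) hnd.2 (PySem.Dict.nodup_keys_insert d i (g i) hd)]
    by_cases hc : d.contains i
    · rw [PySem.Dict.items_insert_of_contains d (g i) hc]
      rw [List.map_map]
      congr 1
      · apply List.map_congr_left
        intro p _
        by_cases hpi : p.1 = i
        · simp [Function.comp, hpi, hnd.1]
        · simp [Function.comp, hpi]
      · rw [show (i :: t).filter (fun j => !d.contains j) = t.filter (fun j => !d.contains j) by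
            simp [hc]]
        congr 1
        apply List.filter_congr
        intro j hj
        have hji : j ≠ i := fun h => hnd.1 (h ▸ hj)
        simp [PySem.Dict.contains_insert, hji]
    · have hc' : d.contains i = false := by simpa using hc
      have hkeys : ∀ p ∈ d.items, p.1 ≠ i := by
        intro p hp
        simp only [PySem.Dict.contains, List.any_eq_false] at hc'
        simpa using hc' p hp
      rw [PySem.Dict.items_insert_of_not_contains d (g i) hc']
      rw [List.map_append]
      rw [show (i :: t).filter (fun j => !d.contains j) = i :: t.filter (fun j => !d.contains j) by
            simp [hc']]
      rw [List.map_cons, List.map_nil,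
          show (if (i, g i).1 ∈ t then ((i, g i).1, g (i, g i).1) else (i, g i)) = (i, g i) from if_neg hnd.1]
      rw [show (List.map (fun p => if p.1 ∈ t then (p.1, g p.1) else p) d.items ++ [(i, g i)] : List (Int × Int)) ++
            List.map (fun i => (i, g i)) (List.filter (fun j => !(d.insert i (g i)).contains j) t)
          = List.map (fun p => if p.1 ∈ t then (p.1, g p.1) else p) d.items ++ ((i, g i) ::
            List.map (fun i => (i, g i)) (List.filter (fun j => !(d.insert i (g i)).contains j) t)) from by
            rw [List.append_assoc]; rfl]
      congr 1
      · apply List.map_congr_left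
        intro p hp
        have := hkeys p hp
        by_cases hpt : p.1 ∈ t <;> simp [hpt, this]
      · rw [List.map_cons]
        congr 2
        apply List.filter_congr
        intro j hj
        have hji : j ≠ i := fun h => hnd.1 (h ▸ hj)
        simp [PySem.Dict.contains_insert, hji]

theorem items_foldl_insertOpt (g : Int → Option Int) :
    ∀ (l : List Int) (d : PySem.Dict Int Int), l.Nodup → d.keys.Nodup →
    (∀ i ∈ l, (g i).isSome → d.contains i = false) →
    (l.foldl (fun r k => match g k with | some v => r.insert k v | none => r) d).items
      = d.items ++ l.filterMap (fun k => (g k).map (fun v => (k, v))) := by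
  intro l
  induction l with
  | nil => intro d _ _ _; simp
  | cons k t ih =>
    intro d hnd hd hfresh
    rw [List.nodup_cons] at hnd
    rw [List.foldl_cons]
    cases hg : g k with
    | none =>
      rw [ih d hnd.2 hd (fun j hj => hfresh j (List.mem_cons_of_mem k hj))]
      simp [hg]
    | some v =>
      have hc : d.contains k = false := hfresh k (List.mem_cons_self) (by simp [hg])
      have hfresh' : ∀ j ∈ t, (g j).isSome → (d.insert k v).contains j = false := by
        intro j hj hjs
        have hjk : j ≠ k := fun h => hnd.1 (h ▸ hj)
        rw [PySem.Dict.contains_insert]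
        simp [hjk, hfresh j (List.mem_cons_of_mem k hj) hjs]
      rw [ih (d.insert k v) hnd.2 (PySem.Dict.nodup_keys_insert d k v hd) hfresh']
      rw [PySem.Dict.items_insert_of_not_contains d v hc]
      rw [List.filterMap_cons]
      simp [hg]

theorem nodup_keys_erase (d : PySem.Dict Int Int) (i : Int) (hd : d.keys.Nodup) :
    (d.erase i).keys.Nodup := by
  have h1 : (List.filter (fun p => !p.1 == i) d.items).Sublist d.items := List.filter_sublist
  have h2 : ((List.filter (fun p => !p.1 == i) d.items).map (fun p : Int × Int => p.1)).Sublist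
      (d.items.map (fun p : Int × Int => p.1)) := h1.map _
  have hd' : (d.items.map (fun p : Int × Int => p.1)).Nodup := hd
  exact h2.nodup hd'

theorem contains_erase_of_ne (d : PySem.Dict Int Int) (i j : Int) (h : j ≠ i) :
    (d.erase i).contains j = d.contains j := by
  show (d.items.filter (fun p => !p.1 == i)).any (fun p => p.1 == j)
      = d.items.any (fun p => p.1 == j)
  induction d.items with
  | nil => rfl
  | cons p t ih =>
    by_cases hpi : p.1 = i
    · simp [hpi, Ne.symm h, ih]
    · simp [hpi, ih]

theorem items_foldl_step (c : Int → Bool) (F : Int → Int) :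
    ∀ (l : List Int) (d : PySem.Dict Int Int), l.Nodup → d.keys.Nodup →
    (∀ i ∈ l, d.contains i = true) →
    (l.foldl (fun s i => if c i then (if F i = 0 then s.erase i else s.insert i (F i)) else s) d).items
      = d.items.filterMap (fun p => if p.1 ∈ l then
          (if c p.1 then (if F p.1 = 0 then none else some (p.1, F p.1)) else some p) else some p) := by
  intro l
  induction l with
  | nil => intro d _ _ _; simp
  | cons i t ih =>
    intro d hnd hd hmem
    rw [List.nodup_cons] at hnd
    rw [List.foldl_cons]
    by_cases hci : c i = true
    · by_cases hFi : F i = 0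
      · rw [if_pos hci, if_pos hFi]
        rw [ih (d.erase i) hnd.2 (nodup_keys_erase d i hd) ?hm]
        case hm =>
          intro j hj
          have hji : j ≠ i := fun h => hnd.1 (h ▸ hj)
          rw [contains_erase_of_ne d i j hji]
          exact hmem j (List.mem_cons_of_mem i hj)
        rw [show (d.erase i).items = d.items.filter (fun p => !(p.1 == i)) from rfl]
        rw [List.filterMap_filter]
        apply List.filterMap_congr
        intro p _
        by_cases hpi : p.1 = i
        · simp [hpi, hnd.1, hci, hFi]
        · simp [hpi]
      · rw [if_pos hci, if_neg hFi]
        have hcont : d.contains i = true := hmem i List.mem_cons_self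
        rw [ih (d.insert i (F i)) hnd.2 ?nd ?hm]
        case nd => exact PySem.Dict.nodup_keys_insert d i (F i) hd
        case hm =>
          intro j hj
          rw [PySem.Dict.contains_insert]
          simp [hmem j (List.mem_cons_of_mem i hj)]
        rw [PySem.Dict.items_insert_of_contains d (F i) hcont]
        rw [List.filterMap_map]
        apply List.filterMap_congr
        intro p _
        by_cases hpi : p.1 = i
        · simp [Function.comp, hpi, hnd.1, hci, hFi]
        · simp [Function.comp, hpi]
    · rw [if_neg hci]
      rw [ih d hnd.2 hd (fun j hj => hmem j (List.mem_cons_of_mem i hj))]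
      apply List.filterMap_congr
      intro p _
      by_cases hpi : p.1 = i
      · simp [hpi, hnd.1, hci]
      · simp [hpi]

theorem filter_map_eq_filterMap {α β : Type} (q : α → Bool) (g : α → β) (l : List α) :
    (l.filter q).map g = l.filterMap (fun a => if q a then some (g a) else none) := by
  induction l with
  | nil => rfl
  | cons a t ih => by_cases h : q a <;> simp [h, ih]

def Gfun (d1 d2 : PySem.Dict Int Int) (i : Int) : Option (Int × Int) :=
  if d2.contains i then
    (if d1.getD i 0 + d2.getD i 0 = 0 then none else some (i, d1.getD i 0 + d2.getD i 0))
  else some (i, d1.getD i 0)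

def Hfun (d1 d2 : PySem.Dict Int Int) (k : Int) : Option (Int × Int) :=
  if d1.contains k then none else some (k, d2.getD k 0)

theorem A_items (v1 v2 : List (Int × Int)) :
    sparse_add v1 v2
      = (PySem.Dict.ofList v1 : PySem.Dict Int Int).keys.filterMap
          (Gfun (PySem.Dict.ofList v1) (PySem.Dict.ofList v2))
        ++ (PySem.Dict.ofList v2 : PySem.Dict Int Int).keys.filterMap
          (Hfun (PySem.Dict.ofList v1) (PySem.Dict.ofList v2)) := by
  have hk1 : (PySem.Dict.ofList v1 : PySem.Dict Int Int).keys.Nodup := PySem.Dict.nodup_keys_ofList v1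
  have hk2 : (PySem.Dict.ofList v2 : PySem.Dict Int Int).keys.Nodup := PySem.Dict.nodup_keys_ofList v2
  simp only [sparse_add]
  set d1 : PySem.Dict Int Int := PySem.Dict.ofList v1 with hd1
  set d2 : PySem.Dict Int Int := PySem.Dict.ofList v2 with hd2
  set s1 : PySem.Dict Int Int := d1.keys.foldl (fun s i => s.insert i (d1.getD i 0)) PySem.Dict.empty with hs1def
  set s2 : PySem.Dict Int Int := d2.keys.foldl (fun s i => s.insert i (d2.getD i 0)) s1 with hs2def
  -- pass 1
  have hs1 : s1.items = d1.keys.map (fun i => (i, d1.getD i 0)) := by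
    rw [hs1def, items_foldl_insert_fn (fun i => d1.getD i 0) d1.keys PySem.Dict.empty hk1
        (by rw [show (PySem.Dict.empty : PySem.Dict Int Int).keys = [] from rfl]; exact List.nodup_nil)]
    rw [show (PySem.Dict.empty : PySem.Dict Int Int).items = [] from rfl]
    rw [show (fun i => !(PySem.Dict.empty : PySem.Dict Int Int).contains i) = (fun _ : Int => true) from
        funext fun i => by simp]
    simp
  have hs1keys : s1.keys = d1.keys := by
    rw [show s1.keys = s1.items.map (fun p => p.1) from rfl, hs1, List.map_map]
    rw [show ((fun p : Int × Int => p.1) ∘ fun i : Int => (i, d1.getD i 0)) = fun i : Int => i from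
        funext fun i => rfl]
    exact List.map_id d1.keys
  have hs1contains : ∀ i, s1.contains i = d1.contains i := by
    intro i
    rw [PySem.Dict.contains_eq_decide_mem_keys, PySem.Dict.contains_eq_decide_mem_keys, hs1keys]
  -- pass 2
  have hs2 : s2.items
      = d1.keys.map (fun i => (i, if d2.contains i then d2.getD i 0 else d1.getD i 0))
        ++ d2.keys.filterMap (Hfun d1 d2) := by
    rw [hs2def, items_foldl_insert_fn (fun i => d2.getD i 0) d2.keys s1 hk2 (by rw [hs1keys]; exact hk1)]
    rw [hs1, List.map_map]
    congr 1
    · apply List.map_congr_left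
      intro i _
      by_cases hm : i ∈ d2.keys
      · simp [Function.comp, hm, PySem.Dict.contains_eq_decide_mem_keys]
      · simp [Function.comp, hm, PySem.Dict.contains_eq_decide_mem_keys]
    · rw [show (fun i => !s1.contains i) = (fun i => !d1.contains i) from funext fun i => by rw [hs1contains]]
      rw [filter_map_eq_filterMap]
      apply List.filterMap_congr
      intro k _
      by_cases hc : d1.contains k <;> simp [Hfun, hc]
  have hs2keys : s2.keys = d1.keys ++ (d2.keys.filter (fun i => !d1.contains i)) := by
    rw [show s2.keys = s2.items.map (fun p => p.1) from rfl, hs2, List.map_append, List.map_map]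
    congr 1
    · rw [show ((fun p : Int × Int => p.1) ∘
            fun i : Int => (i, if d2.contains i then d2.getD i 0 else d1.getD i 0)) = fun i : Int => i from
          funext fun i => rfl]
      exact List.map_id d1.keys
    · rw [show (d2.keys.filterMap (Hfun d1 d2)).map (fun p => p.1)
            = d2.keys.filterMap (fun k => (Hfun d1 d2 k).map (fun p => p.1)) from List.map_filterMap]
      rw [show List.filter (fun i => !d1.contains i) d2.keys
            = d2.keys.filterMap (fun a => if !d1.contains a then some a else none) from by
          simpa using filter_map_eq_filterMap (fun i => !d1.contains i) (fun a : Int => a) d2.keys]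
      apply List.filterMap_congr
      intro k _
      by_cases hc : d1.contains k <;> simp [Hfun, hc]
  have hs2nd : s2.keys.Nodup := by
    rw [hs2keys]
    refine List.Nodup.append hk1 (List.Nodup.filter _ hk2) ?_
    intro a ha hb
    have := List.of_mem_filter hb
    rw [PySem.Dict.contains_eq_decide_mem_keys] at this
    simp [ha] at this
  have hs2mem : ∀ i ∈ d1.keys, s2.contains i = true := by
    intro i hi
    rw [PySem.Dict.contains_eq_decide_mem_keys, hs2keys]
    simp [hi]
  -- pass 3: collapse the inner loop, then characterise the outer loop
  have hfA : (fun (s : PySem.Dict Int Int) i =>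
        d2.keys.foldl (fun s j =>
          if i == j then
            let s' := s.insert i (d1.getD i 0 + d2.getD j 0)
            if s'.getD i 0 == 0 then s'.erase i else s'
          else s) s)
      = (fun s i => if d2.contains i then
            (if d1.getD i 0 + d2.getD i 0 = 0 then s.erase i else s.insert i (d1.getD i 0 + d2.getD i 0))
          else s) := by
    funext s i
    rw [foldl_once _ i (fun s j hj => by simp [Ne.symm hj]) d2.keys hk2 s]
    rw [PySem.Dict.contains_eq_decide_mem_keys]
    by_cases hm : i ∈ d2.keys
    · simp only [hm, if_pos, decide_true]
      rw [PySem.Dict.getD_insert_self]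
      by_cases h0 : d1.getD i 0 + d2.getD i 0 = 0
      · simp [h0, insert_erase_self]
      · simp [h0]
    · simp [hm]
  rw [hfA]
  rw [items_foldl_step d2.contains (fun i => d1.getD i 0 + d2.getD i 0) d1.keys s2 hk1 hs2nd hs2mem]
  rw [hs2, List.filterMap_append]
  congr 1
  · rw [List.filterMap_map]
    apply List.filterMap_congr
    intro i hi
    by_cases hc : d2.contains i
    · by_cases h0 : d1.getD i 0 + d2.getD i 0 = 0 <;> simp [Function.comp, Gfun, hi, hc, h0]
    · simp [Function.comp, Gfun, hi, hc]
  · have hall : ∀ p ∈ (PySem.Dict.keys d2).filterMap (Hfun d1 d2),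
        (if p.1 ∈ d1.keys then
          (if d2.contains p.1 then
            (if d1.getD p.1 0 + d2.getD p.1 0 = 0 then none
             else some (p.1, d1.getD p.1 0 + d2.getD p.1 0))
           else some p)
         else some p) = some p := by
      intro p hp
      rcases List.mem_filterMap.mp hp with ⟨k, hk, hfk⟩
      by_cases hc : d1.contains k
      · simp [Hfun, hc] at hfk
      · simp only [Hfun, hc, Bool.false_eq_true, ↓reduceIte, Option.some.injEq] at hfk
        have hnk : k ∉ d1.keys := by
          rw [PySem.Dict.contains_eq_decide_mem_keys] at hc
          simpa using hc
        rw [← hfk]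
        simp [hnk]
    rw [List.filterMap_congr hall, List.filterMap_some]

theorem nodup_filterMap_id (f : Int → Option Int) (h : ∀ a b, f a = some b → b = a) :
    ∀ l : List Int, l.Nodup → (l.filterMap f).Nodup := by
  intro l
  induction l with
  | nil => intro _; simp
  | cons a t ih =>
    intro hnd
    rw [List.nodup_cons] at hnd
    rw [List.filterMap_cons]
    cases hf : f a with
    | none => exact ih hnd.2
    | some b =>
      have hb := h a b hf
      subst hb
      refine List.nodup_cons.mpr ⟨?_, ih hnd.2⟩
      intro hmem
      rcases List.mem_filterMap.mp hmem with ⟨c, hc, hfc⟩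
      have := h c _ hfc
      subst this
      exact hnd.1 hc

theorem B_items (v1 v2 : List (Int × Int)) :
    sparse_add_alt v1 v2
      = (PySem.Dict.ofList v1 : PySem.Dict Int Int).keys.filterMap
          (Gfun (PySem.Dict.ofList v1) (PySem.Dict.ofList v2))
        ++ (PySem.Dict.ofList v2 : PySem.Dict Int Int).keys.filterMap
          (Hfun (PySem.Dict.ofList v1) (PySem.Dict.ofList v2)) := by
  have hk1 : (PySem.Dict.ofList v1 : PySem.Dict Int Int).keys.Nodup := PySem.Dict.nodup_keys_ofList v1
  have hk2 : (PySem.Dict.ofList v2 : PySem.Dict Int Int).keys.Nodup := PySem.Dict.nodup_keys_ofList v2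
  simp only [sparse_add_alt]
  set d1 : PySem.Dict Int Int := PySem.Dict.ofList v1 with hd1
  set d2 : PySem.Dict Int Int := PySem.Dict.ofList v2 with hd2
  -- first pass: recast the conditional inserts as an optional-value insert loop
  have hfB1 : (fun (r : PySem.Dict Int Int) k =>
        if d2.contains k then
          let total := d1.getD k 0 + d2.getD k 0
          if total ≠ 0 then r.insert k total else r
        else r.insert k (d1.getD k 0))
      = (fun r k =>
          match (if d2.contains k then
                  (if d1.getD k 0 + d2.getD k 0 = 0 then none else some (d1.getD k 0 + d2.getD k 0))
                 else some (d1.getD k 0)) with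
          | some v => r.insert k v
          | none => r) := by
    funext r k
    by_cases hc : d2.contains k
    · by_cases h0 : d1.getD k 0 + d2.getD k 0 = 0 <;> simp [hc, h0]
    · simp [hc]
  rw [hfB1]
  set r1 : PySem.Dict Int Int := d1.keys.foldl (fun r k =>
          match (if d2.contains k then
                  (if d1.getD k 0 + d2.getD k 0 = 0 then none else some (d1.getD k 0 + d2.getD k 0))
                 else some (d1.getD k 0)) with
          | some v => r.insert k v
          | none => r) PySem.Dict.empty with hr1def
  have hr1 : r1.items = d1.keys.filterMap (Gfun d1 d2) := by
    rw [hr1def, items_foldl_insertOpt _ d1.keys PySem.Dict.empty hk1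
        (by rw [show (PySem.Dict.empty : PySem.Dict Int Int).keys = [] from rfl]; exact List.nodup_nil)
        (fun i _ _ => PySem.Dict.contains_empty i)]
    rw [show (PySem.Dict.empty : PySem.Dict Int Int).items = [] from rfl, List.nil_append]
    apply List.filterMap_congr
    intro k _
    by_cases hc : d2.contains k
    · by_cases h0 : d1.getD k 0 + d2.getD k 0 = 0 <;> simp [Gfun, hc, h0]
    · simp [Gfun, hc]
  have hr1keys : r1.keys = d1.keys.filterMap (fun a => (Gfun d1 d2 a).map (fun p => p.1)) := by
    rw [show r1.keys = r1.items.map (fun p => p.1) from rfl, hr1]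
    exact List.map_filterMap
  have hGkey : ∀ a b, ((Gfun d1 d2 a).map (fun p => p.1)) = some b → b = a := by
    intro a b hab
    by_cases hc : d2.contains a
    · by_cases h0 : d1.getD a 0 + d2.getD a 0 = 0
      · simp [Gfun, hc, h0] at hab
      · simp [Gfun, hc, h0] at hab
        omega
    · simp [Gfun, hc] at hab
      omega
  have hr1nd : r1.keys.Nodup := by
    rw [hr1keys]
    exact nodup_filterMap_id _ hGkey d1.keys hk1
  have hr1sub : ∀ k, k ∈ r1.keys → k ∈ d1.keys := by
    intro k hk
    rw [hr1keys] at hk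
    rcases List.mem_filterMap.mp hk with ⟨a, ha, hfa⟩
    have := hGkey a k hfa
    subst this
    exact ha
  -- second pass
  have hfB2 : (fun (r : PySem.Dict Int Int) k => if d1.contains k then r else r.insert k (d2.getD k 0))
      = (fun r k =>
          match (if d1.contains k then none else some (d2.getD k 0)) with
          | some v => r.insert k v
          | none => r) := by
    funext r k
    by_cases hc : d1.contains k
    · simp [hc]
    · simp [hc]
  rw [hfB2]
  rw [items_foldl_insertOpt _ d2.keys r1 hk2 hr1nd ?fresh]
  case fresh =>
    intro k _ hks
    by_cases hc : d1.contains k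
    · simp [hc] at hks
    · rw [PySem.Dict.contains_eq_decide_mem_keys]
      have : k ∉ d1.keys := by
        rw [PySem.Dict.contains_eq_decide_mem_keys] at hc
        simpa using hc
      simp only [decide_eq_false_iff_not]
      exact fun hk => this (hr1sub k hk)
  rw [hr1]
  congr 1
  apply List.filterMap_congr
  intro k _
  by_cases hc : d1.contains k <;> simp [Hfun, hc]

-- ===== VERDICT (by name: the statement is the Claim_ definition above) =====
theorem sparse_add_spec : Claim_equal_sparse_add := by
  intro vector1 vector2 _
  unfold Spec_sparse_add
  rw [A_items, B_items]
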